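-- pv_equiv track=rewrite | github.com/mdnoyon9758/MAN-Scraper-Suite | omniscraper/ai/smart_filter.py | prioritize_sources
-- ===== SOURCE A (Python) =====
-- from typing import List, Dict, Any
--
-- def prioritize_sources(data: List[Dict[str, Any]], preferred_sources: List[str]) -> List[Dict[str, Any]]:
--     """Prioritize certain data sources"""
--     prioritized = []
--     non_prioritized = []
--
--     for item in data:
--         source = item.get('source', '').lower()
--         if source in preferred_sources:
--             prioritized.append(item)
--         else:
--             non_prioritized.append(item)
--
--     return prioritized + non_prioritized
-- ===== SOURCE B (Python) =====
-- def prioritize_sources(data, preferred_sources):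
--     """Prioritize certain data sources"""
--     return sorted(data, key=lambda item: item.get('source', '').lower() not in preferred_sources)
-- ===== Notes on version B (the rewrite author's own statement) =====
-- stated objective: simpler
-- what changed: Replaces the two explicit accumulator lists and their concatenation with a single stable sort keyed on the negated membership predicate, so preferred items come first and original order is preserved within each group.
import Mathlib
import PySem

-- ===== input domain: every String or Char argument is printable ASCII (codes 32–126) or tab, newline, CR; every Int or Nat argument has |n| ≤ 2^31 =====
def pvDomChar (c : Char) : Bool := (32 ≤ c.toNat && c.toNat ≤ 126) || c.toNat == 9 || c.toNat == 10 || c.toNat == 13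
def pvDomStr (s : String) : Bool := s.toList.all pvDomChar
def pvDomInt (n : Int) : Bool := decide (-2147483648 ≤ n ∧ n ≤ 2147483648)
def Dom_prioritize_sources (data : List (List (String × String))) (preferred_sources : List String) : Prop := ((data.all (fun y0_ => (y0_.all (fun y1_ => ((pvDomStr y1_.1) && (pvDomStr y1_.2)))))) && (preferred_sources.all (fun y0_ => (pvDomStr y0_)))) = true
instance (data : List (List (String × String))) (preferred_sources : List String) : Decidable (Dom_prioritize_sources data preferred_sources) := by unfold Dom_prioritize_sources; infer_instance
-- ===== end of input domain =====

-- B replaces A's two accumulator lists with one stable sort keyed on the negated membership predicate (objective: simpler).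

-- ===== PORT A =====
def prioritize_sources (data : List (List (String × String))) (preferred_sources : List String) : List (List (String × String)) :=
  let r := data.foldl
    (fun (acc : List (List (String × String)) × List (List (String × String))) item =>
      let source := PySem.Str.lower ((PySem.Dict.mk item).getD "source" "")
      if preferred_sources.contains source then (acc.1 ++ [item], acc.2)
      else (acc.1, acc.2 ++ [item]))
    ([], [])
  r.1 ++ r.2

-- ===== PORT B =====
def prioritize_sources_alt (data : List (List (String × String))) (preferred_sources : List String) : List (List (String × String)) :=
  PySem.List.sorted data
    (fun item => !(preferred_sources.contains (PySem.Str.lower ((PySem.Dict.mk item).getD "source" ""))))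

-- ===== PRECONDITION & SPEC =====
def Spec_prioritize_sources (data : List (List (String × String))) (preferred_sources : List String) (out : List (List (String × String))) : Prop := out = prioritize_sources_alt data preferred_sources
instance (data : List (List (String × String))) (preferred_sources : List String) (out : List (List (String × String))) : Decidable (Spec_prioritize_sources data preferred_sources out) := by unfold Spec_prioritize_sources; infer_instance

-- ===== CLAIM (what is proved, stated in full; the proofs are below) =====
def Claim_equal_prioritize_sources : Prop := ∀ (data : List (List (String × String))) (preferred_sources : List String), Dom_prioritize_sources data preferred_sources → Spec_prioritize_sources data preferred_sources (prioritize_sources data preferred_sources)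

-- ===== LEMMAS AND PROOFS =====

-- A's loop: the pair of accumulator lists is (prefix ++ filter p, prefix ++ filter !p).
theorem pv_a_loop {α : Type} (p : α → Bool) :
    ∀ (l : List α) (a b : List α),
      l.foldl (fun (acc : List α × List α) x =>
        if p x then (acc.1 ++ [x], acc.2) else (acc.1, acc.2 ++ [x])) (a, b)
      = (a ++ l.filter p, b ++ l.filter (fun x => !p x)) := by
  intro l
  induction l with
  | nil => simp
  | cons x t ih =>
    intro a b
    by_cases h : p x = true <;> simp [List.foldl_cons, h, ih]

-- insertBy puts x after a block it is not before and in front of a block it is before.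
theorem pv_insertBy_split {α : Type} (before : α → α → Bool) (x : α) :
    ∀ (a b : List α), (∀ y ∈ a, before x y = false) → (∀ y ∈ b, before x y = true) →
      PySem.List.insertBy before x (a ++ b) = a ++ x :: b := by
  intro a
  induction a with
  | nil =>
    intro b _ hb
    cases b with
    | nil => simp [PySem.List.insertBy]
    | cons y ys => simp [PySem.List.insertBy, hb y (by simp)]
  | cons z a ih =>
    intro b ha hb
    have hz : before x z = false := ha z (by simp)
    simp only [List.cons_append, PySem.List.insertBy, hz]
    simp [ih b (fun y hy => ha y (by simp [hy])) hb]

-- B's insertion-sort loop with the Bool key !p keeps the shape (filter p ++ filter !p).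
theorem pv_b_loop {α : Type} (p : α → Bool) :
    ∀ (l : List α) (a b : List α),
      (∀ y ∈ a, p y = true) → (∀ y ∈ b, p y = false) →
      l.foldl (fun acc x =>
          PySem.List.insertBy (fun u v => decide ((!p u) < (!p v))) x acc) (a ++ b)
      = (a ++ l.filter p) ++ (b ++ l.filter (fun x => !p x)) := by
  intro l
  induction l with
  | nil => simp
  | cons x t ih =>
    intro a b ha hb
    by_cases h : p x = true
    · have hstep : PySem.List.insertBy (fun u v => decide ((!p u) < (!p v))) x (a ++ b)
          = (a ++ [x]) ++ b := by
        rw [pv_insertBy_split (fun u v => decide ((!p u) < (!p v))) x a b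
            (fun y hy => by simp [h, ha y hy])
            (fun y hy => by simp [h, hb y hy, Bool.lt_iff])]
        simp
      simp only [List.foldl_cons, hstep]
      rw [ih (a ++ [x]) b
          (by intro y hy; rcases List.mem_append.mp hy with hy | hy
              · exact ha y hy
              · simp at hy; simpa [hy] using h)
          hb]
      simp [h]
    · have h' : p x = false := by simpa using h
      have hstep : PySem.List.insertBy (fun u v => decide ((!p u) < (!p v))) x (a ++ b)
          = (a ++ b) ++ [x] := by
        apply PySem.List.insertBy_of_forall_not_before
        intro y hy
        simp [Bool.lt_iff, h']
      simp only [List.foldl_cons, hstep]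
      rw [List.append_assoc, ih a (b ++ [x])
          ha
          (by intro y hy; rcases List.mem_append.mp hy with hy | hy
              · exact hb y hy
              · simp at hy; simpa [hy] using h')]
      simp [h']

-- ===== VERDICT (by name: the statement is the Claim_ definition above) =====
theorem prioritize_sources_spec : Claim_equal_prioritize_sources := by
  intro data preferred_sources _
  unfold Spec_prioritize_sources prioritize_sources prioritize_sources_alt
  set p : List (String × String) → Bool :=
    fun item => preferred_sources.contains (PySem.Str.lower ((PySem.Dict.mk item).getD "source" ""))
    with hp
  rw [PySem.List.sorted_eq_foldl_insertBy]
  have hb := pv_b_loop p data [] [] (by simp) (by simp)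
  simp only [List.nil_append] at hb
  simp only [hp] at hb
  rw [hb]
  have ha := pv_a_loop p data [] []
  simp only [List.nil_append, hp] at ha
  simp only [ha]
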